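-- pv_equiv track=rewrite | github.com/ChimdiWalter/Omics_Project_CCSPR | experiments/run_enrichment_analysis.py | compute_shared_vs_specific
-- ===== SOURCE A (Python) =====
-- def compute_shared_vs_specific(
--     tip_genes: dict[str, list[str]],
-- ) -> tuple[list[str], dict[str, list[str]]]:
--     """Identify genes shared across all backends vs backend-specific."""
--     all_sets = {m: set(g) for m, g in tip_genes.items()}
--     if not all_sets:
--         return [], {}
--
--     shared = set.intersection(*all_sets.values())
--     specific = {}
--     for m, gs in all_sets.items():
--         others = set.union(*(s for k, s in all_sets.items() if k != m))
--         specific[m] = sorted(gs - others)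
--
--     return sorted(shared), specific
-- ===== SOURCE B (Python) =====
-- def compute_shared_vs_specific(
--     tip_genes: dict[str, list[str]],
-- ) -> tuple[list[str], dict[str, list[str]]]:
--     """Identify genes shared across all backends vs backend-specific.
--
--     Single counting pass: record for each gene the set of backends that
--     contain it, then read shared (owned by all) and specific (owned by
--     exactly one) straight off that index.
--     """
--     if not tip_genes:
--         return [], {}
--     n_backends = len(tip_genes)
--     owners: dict[str, set[str]] = {}
--     for m, gs in tip_genes.items():
--         for g in gs:
--             owners.setdefault(g, set()).add(m)
--     shared = sorted(g for g, ms in owners.items() if len(ms) == n_backends)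
--     singles: dict[str, list[str]] = {}
--     for g, ms in owners.items():
--         if len(ms) == 1:
--             singles.setdefault(next(iter(ms)), []).append(g)
--     specific = {m: sorted(singles.get(m, [])) for m in tip_genes}
--     return shared, specific
-- ===== Notes on version B (the rewrite author's own statement) =====
-- stated objective: faster
-- what changed: Instead of rebuilding the union of all other backends' gene sets for every backend (A), B makes one counting pass that records for each gene the set of backends owning it, then reads shared (owned by all M) and specific (owned by exactly one) straight off that index.
import Mathlib
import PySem

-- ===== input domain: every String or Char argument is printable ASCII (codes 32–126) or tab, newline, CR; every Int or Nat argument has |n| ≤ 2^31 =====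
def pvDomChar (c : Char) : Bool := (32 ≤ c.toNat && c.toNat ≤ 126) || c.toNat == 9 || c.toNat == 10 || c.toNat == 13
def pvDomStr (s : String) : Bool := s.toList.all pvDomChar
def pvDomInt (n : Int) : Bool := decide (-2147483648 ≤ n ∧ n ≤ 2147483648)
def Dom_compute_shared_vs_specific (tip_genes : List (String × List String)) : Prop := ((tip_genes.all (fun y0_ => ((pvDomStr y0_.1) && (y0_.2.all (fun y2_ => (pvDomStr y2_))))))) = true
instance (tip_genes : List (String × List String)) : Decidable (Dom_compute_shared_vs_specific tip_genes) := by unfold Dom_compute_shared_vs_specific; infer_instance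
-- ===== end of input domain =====

-- B replaces A's per-backend union-of-all-others rebuild (O(M·N)) by one counting pass that
-- records, per gene, the set of backends owning it (objective: faster). Return value only;
-- no observable mutation in either version.

-- ===== PORT A =====
-- set.intersection(*sets) / set.union(*sets) over the argument list; Python raises TypeError
-- when the list is empty (Pre_ excludes the only input that reaches that: a one-key dict),
-- so the [] branches below are never taken under Pre_.
def pvInterAll (l : List (PySem.Set String)) : PySem.Set String :=
  match l with
  | [] => PySem.Set.empty
  | s :: ss => ss.foldl PySem.Set.inter s

def pvUnionAll (l : List (PySem.Set String)) : PySem.Set String :=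
  match l with
  | [] => PySem.Set.empty
  | s :: ss => ss.foldl PySem.Set.union s

def compute_shared_vs_specific (tip_genes : List (String × List String)) : List String × (List (String × List String)) :=
  -- all_sets = {m: set(g) for m, g in tip_genes.items()}
  let all_sets : PySem.Dict String (PySem.Set String) :=
    (PySem.Dict.ofList tip_genes).items.foldl
      (fun d p => d.insert p.1 (PySem.Set.ofList p.2)) PySem.Dict.empty
  if all_sets.items.isEmpty then ([], [])
  else
    -- shared = set.intersection(*all_sets.values())
    let shared := pvInterAll all_sets.values
    -- for m, gs in all_sets.items(): specific[m] = sorted(gs - set.union(*(s for k,s if k != m)))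
    let specific : PySem.Dict String (List String) :=
      all_sets.items.foldl (fun sp p =>
        let others := pvUnionAll ((all_sets.items.filter (fun q => q.1 != p.1)).map (·.2))
        sp.insert p.1 (PySem.List.sorted (PySem.Set.diff p.2 others) (fun x => x)))
        PySem.Dict.empty
    (PySem.List.sorted shared (fun x => x), specific.items)

-- ===== PORT B =====
def compute_shared_vs_specific_alt (tip_genes : List (String × List String)) : List String × (List (String × List String)) :=
  let d := PySem.Dict.ofList tip_genes
  if d.items.isEmpty then ([], [])
  else
    let n := d.size
    -- owners.setdefault(g, set()).add(m): insert g (Set.add (getD g ∅) m) — same position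
    -- (setdefault appends a fresh key, in-place add keeps an existing one) and same value.
    let owners : PySem.Dict String (PySem.Set String) :=
      d.items.foldl (fun ow p =>
        p.2.foldl (fun ow g => ow.insert g (PySem.Set.add (ow.getD g PySem.Set.empty) p.1)) ow)
        PySem.Dict.empty
    -- shared = sorted(g for g, ms in owners.items() if len(ms) == n_backends)
    let shared := PySem.List.sorted
      ((owners.items.filter (fun q => q.2.length == n)).map (·.1)) (fun x => x)
    -- for g, ms in owners.items(): if len(ms) == 1: singles.setdefault(next(iter(ms)), []).append(g)
    -- (next(iter(ms)) on the 1-element set ms is its only element: headD; setdefault+append = modify)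
    let singles : PySem.Dict String (List String) :=
      owners.items.foldl (fun sg q =>
        if q.2.length == 1 then sg.modify (q.2.headD "") [] (fun l => l ++ [q.1]) else sg)
        PySem.Dict.empty
    -- specific = {m: sorted(singles.get(m, [])) for m in tip_genes}
    let specific := d.items.map (fun p =>
      (p.1, PySem.List.sorted (singles.getD p.1 []) (fun x => x)))
    (shared, specific)

-- ===== PRECONDITION & SPEC =====
-- Pre_ excludes exactly the dicts with ONE (distinct) key: there A's 'set.union(*())' is called
-- with an empty argument list and raises TypeError, so A returns nothing to match.
def Pre_compute_shared_vs_specific (tip_genes : List (String × List String)) : Prop :=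
  (PySem.Set.ofList (tip_genes.map (·.1))).length ≠ 1
instance (tip_genes : List (String × List String)) : Decidable (Pre_compute_shared_vs_specific tip_genes) := by unfold Pre_compute_shared_vs_specific; infer_instance

def pvWitness_compute_shared_vs_specific : (List (String × List String)) :=
  [("svm", ["a", "b"]), ("rf", ["b", "c"])]

def Spec_compute_shared_vs_specific (tip_genes : List (String × List String)) (out : List String × (List (String × List String))) : Prop := out = compute_shared_vs_specific_alt tip_genes
instance (tip_genes : List (String × List String)) (out : List String × (List (String × List String))) : Decidable (Spec_compute_shared_vs_specific tip_genes out) := by unfold Spec_compute_shared_vs_specific; infer_instance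

-- ===== CLAIM (what is proved, stated in full; the proofs are below) =====
def Claim_equal_compute_shared_vs_specific : Prop := ∀ (tip_genes : List (String × List String)), Dom_compute_shared_vs_specific tip_genes → Pre_compute_shared_vs_specific tip_genes → Spec_compute_shared_vs_specific tip_genes (compute_shared_vs_specific tip_genes)


-- ===== LEMMAS AND PROOFS =====

-- per-gene owner list: the keys of the backends whose gene list contains g, in key order
def pvOwnersOf (L : List (String × List String)) (g : String) : List String :=
  (L.filter (fun p => decide (g ∈ p.2))).map (·.1)

def pvOwnersFold (L : List (String × List String))
    (ow : PySem.Dict String (PySem.Set String)) : PySem.Dict String (PySem.Set String) :=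
  L.foldl (fun ow p =>
    p.2.foldl (fun ow g => ow.insert g (PySem.Set.add (ow.getD g PySem.Set.empty) p.1)) ow) ow

theorem pvInner_getD (gs : List String) (m : String)
    (ow : PySem.Dict String (PySem.Set String)) (g : String) :
    ((gs.foldl (fun ow g => ow.insert g (PySem.Set.add (ow.getD g PySem.Set.empty) m)) ow).getD
        g PySem.Set.empty)
      = if g ∈ gs then PySem.Set.add (ow.getD g PySem.Set.empty) m
        else ow.getD g PySem.Set.empty := by
  induction gs generalizing ow with
  | nil => simp
  | cons a gs ih =>
    simp only [List.foldl_cons, ih, PySem.Dict.getD_insert, List.mem_cons]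
    by_cases hga : g = a
    · subst hga
      by_cases hgs : g ∈ gs <;>
        simp [hgs]
    · by_cases hgs : g ∈ gs <;> simp [hga, hgs]

theorem pvOuter_getD (L : List (String × List String))
    (ow : PySem.Dict String (PySem.Set String)) (g : String) :
    (pvOwnersFold L ow).getD g PySem.Set.empty
      = PySem.Set.update (ow.getD g PySem.Set.empty) (pvOwnersOf L g) := by
  induction L generalizing ow with
  | nil => simp [pvOwnersFold, pvOwnersOf, PySem.Set.update]
  | cons p L ih =>
    simp only [pvOwnersFold, List.foldl_cons] at *
    rw [ih, pvInner_getD]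
    by_cases hg : g ∈ p.2 <;>
      simp [pvOwnersOf, hg, PySem.Set.update]

theorem pvOwnersOf_nodup (L : List (String × List String))
    (h : (L.map (·.1)).Nodup) (g : String) : (pvOwnersOf L g).Nodup := by
  unfold pvOwnersOf
  exact h.sublist (List.Sublist.map _ List.filter_sublist)

theorem pvOwners_getD (L : List (String × List String)) (h : (L.map (·.1)).Nodup) (g : String) :
    (pvOwnersFold L PySem.Dict.empty).getD g PySem.Set.empty = pvOwnersOf L g := by
  rw [pvOuter_getD]
  have : PySem.Dict.empty.getD g PySem.Set.empty = ([] : PySem.Set String) := by simp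
  rw [this, PySem.Set.update_nil_left, PySem.Set.ofList_eq_self_of_nodup _ (pvOwnersOf_nodup L h g)]

theorem pvOwners_keys (L : List (String × List String))
    (ow : PySem.Dict String (PySem.Set String)) :
    (pvOwnersFold L ow).keys = L.foldl (fun ks p => PySem.Set.update ks p.2) ow.keys := by
  induction L generalizing ow with
  | nil => simp [pvOwnersFold]
  | cons p L ih =>
    simp only [pvOwnersFold, List.foldl_cons] at *
    rw [ih]
    congr 1
    exact PySem.Dict.keys_foldl_insert p.2 _ ow

theorem pvMem_foldl_update (L : List (String × List String)) (s : PySem.Set String) (g : String) :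
    g ∈ L.foldl (fun ks p => PySem.Set.update ks p.2) s ↔ g ∈ s ∨ ∃ p ∈ L, g ∈ p.2 := by
  induction L generalizing s with
  | nil => simp
  | cons p L ih => simp [ih, PySem.Set.mem_update, or_assoc]

theorem pvNodup_foldl_update (L : List (String × List String)) (s : PySem.Set String)
    (h : s.Nodup) : (L.foldl (fun ks p => PySem.Set.update ks p.2) s).Nodup := by
  induction L generalizing s with
  | nil => exact h
  | cons p L ih => exact ih _ (PySem.Set.nodup_update _ _ h)

theorem pvMem_owners_keys (L : List (String × List String)) (g : String) :
    g ∈ (pvOwnersFold L PySem.Dict.empty).keys ↔ ∃ p ∈ L, g ∈ p.2 := by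
  rw [pvOwners_keys, pvMem_foldl_update]
  simp

theorem pvNodup_owners_keys (L : List (String × List String)) :
    (pvOwnersFold L PySem.Dict.empty).keys.Nodup := by
  rw [pvOwners_keys]
  exact pvNodup_foldl_update _ _ (by simp)

theorem pvSorted_congr (xs ys : List String) (hx : xs.Nodup) (hy : ys.Nodup)
    (h : ∀ a, a ∈ xs ↔ a ∈ ys) :
    PySem.List.sorted xs (fun x => x) = PySem.List.sorted ys (fun x => x) :=
  PySem.List.sorted_eq_sorted_of_perm _ _ _ (fun _ _ h => h)
    ((List.perm_ext_iff_of_nodup hx hy).mpr h)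

theorem pvMem_interFold (ss : List (PySem.Set String)) (s : PySem.Set String) (x : String) :
    x ∈ ss.foldl PySem.Set.inter s ↔ x ∈ s ∧ ∀ t ∈ ss, x ∈ t := by
  induction ss generalizing s with
  | nil => simp
  | cons a ss ih => simp [ih, PySem.Set.mem_inter, and_assoc]

theorem pvNodup_interFold (ss : List (PySem.Set String)) (s : PySem.Set String)
    (h : s.Nodup) : (ss.foldl PySem.Set.inter s).Nodup := by
  induction ss generalizing s with
  | nil => exact h
  | cons a ss ih => exact ih _ (PySem.Set.nodup_inter _ _ h)

theorem pvMem_unionAll (l : List (PySem.Set String)) (h : l ≠ []) (x : String) :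
    x ∈ pvUnionAll l ↔ ∃ s ∈ l, x ∈ s := by
  match l with
  | [] => exact absurd rfl h
  | s :: ss =>
    simp only [pvUnionAll]
    clear h
    induction ss generalizing s with
    | nil => simp
    | cons a ss ih => simp [ih, PySem.Set.mem_union, or_assoc]

theorem pvKey_unique (L : List (String × List String)) :
    (L.map (·.1)).Nodup → ∀ p ∈ L, ∀ q ∈ L, p.1 = q.1 → p = q := by
  induction L with
  | nil => intro _ p hp; cases hp
  | cons a L ih =>
    intro h p hp q hq hpq
    simp only [List.map_cons, List.nodup_cons] at h
    rcases List.mem_cons.mp hp with h1 | h1 <;> rcases List.mem_cons.mp hq with h2 | h2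
    · rw [h1, h2]
    · exact absurd (by rw [← h1, hpq]; exact List.mem_map_of_mem h2) h.1
    · exact absurd (by rw [← h2, ← hpq]; exact List.mem_map_of_mem h1) h.1
    · exact ih h.2 p h1 q h2 hpq

theorem pvMem_ownersOf (L : List (String × List String)) (g x : String) :
    x ∈ pvOwnersOf L g ↔ ∃ q ∈ L, g ∈ q.2 ∧ q.1 = x := by
  simp [pvOwnersOf, List.mem_filter, and_assoc]

theorem pvOwnersOf_length_iff (L : List (String × List String)) (g : String) :
    (pvOwnersOf L g).length = L.length ↔ ∀ p ∈ L, g ∈ p.2 := by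
  simp [pvOwnersOf, List.length_filter_eq_length_iff]

theorem pvSets_items (t : List (String × List String)) :
    ((PySem.Dict.ofList t).items.foldl
      (fun d p => d.insert p.1 (PySem.Set.ofList p.2)) PySem.Dict.empty).items
    = (PySem.Dict.ofList t).items.map (fun p => (p.1, PySem.Set.ofList p.2)) := by
  have hnd : (((PySem.Dict.ofList t).items).map (fun p => p.1)).Nodup := by
    have := PySem.Dict.nodup_keys_ofList t
    simpa [PySem.Dict.keys] using this
  have h := PySem.Dict.items_foldl_insert_fresh (PySem.Dict.ofList t).items
      (fun p => p.1) (fun p => PySem.Set.ofList p.2) PySem.Dict.empty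
      (fun a _ => PySem.Dict.contains_empty _) hnd
  simpa using h

-- B's filtered owners.items as a filter over the keys
theorem pvOwnersItems_filter (L : List (String × List String)) (hknd : (L.map (·.1)).Nodup)
    (pred : PySem.Set String → Bool) :
    (((pvOwnersFold L PySem.Dict.empty).items.filter (fun q => pred q.2)).map (·.1))
      = (pvOwnersFold L PySem.Dict.empty).keys.filter (fun g => pred (pvOwnersOf L g)) := by
  rw [PySem.Dict.items_eq_map_keys _ (pvNodup_owners_keys L) PySem.Set.empty]
  have aux : ∀ ks : List String,
      ((ks.map (fun k => (k, (pvOwnersFold L PySem.Dict.empty).getD k ([] : PySem.Set String)))).filter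
          (fun q => pred q.2)).map (·.1)
        = ks.filter (fun g => pred (pvOwnersOf L g)) := by
    intro ks
    induction ks with
    | nil => rfl
    | cons k ks ih =>
      have h : (pvOwnersFold L PySem.Dict.empty).getD k ([] : PySem.Set String)
          = pvOwnersOf L k := pvOwners_getD L hknd k
      by_cases hk : pred (pvOwnersOf L k) = true <;>
        simp [h, hk, ih]
  exact aux _

theorem pvShared_eq (L : List (String × List String)) (hknd : (L.map (·.1)).Nodup)
    (hL : L ≠ []) :
    PySem.List.sorted (pvInterAll (L.map (fun p => PySem.Set.ofList p.2))) (fun x => x)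
      = PySem.List.sorted
          (((pvOwnersFold L PySem.Dict.empty).items.filter
              (fun q => q.2.length == L.length)).map (·.1)) (fun x => x) := by
  rw [pvOwnersItems_filter L hknd (fun s => s.length == L.length)]
  cases L with
  | nil => exact absurd rfl hL
  | cons p0 L' =>
    apply pvSorted_congr
    · exact pvNodup_interFold _ _ (PySem.Set.nodup_ofList _)
    · exact (pvNodup_owners_keys _).filter _
    · intro a
      rw [List.mem_filter, pvMem_owners_keys]
      simp only [List.map_cons, pvInterAll, pvMem_interFold, beq_iff_eq,
        pvOwnersOf_length_iff]
      constructor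
      · rintro ⟨h0, hrest⟩
        have hall : ∀ p ∈ p0 :: L', a ∈ p.2 := by
          intro p hp
          rcases List.mem_cons.mp hp with rfl | hp
          · exact (PySem.Set.mem_ofList _ _).mp h0
          · exact (PySem.Set.mem_ofList _ _).mp (hrest _ (List.mem_map_of_mem hp))
        exact ⟨⟨p0, List.mem_cons_self, (PySem.Set.mem_ofList _ _).mp h0⟩, hall⟩
      · rintro ⟨_, hall⟩
        refine ⟨(PySem.Set.mem_ofList _ _).mpr (hall _ List.mem_cons_self), ?_⟩
        rintro t ht
        rcases List.mem_map.mp ht with ⟨p, hp, rfl⟩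
        exact (PySem.Set.mem_ofList _ _).mpr (hall _ (List.mem_cons_of_mem _ hp))

theorem pvFoldl_if_filter {α β : Type} (l : List α) (c : α → Bool) (f : β → α → β) (s : β) :
    l.foldl (fun s q => if c q then f s q else s) s = (l.filter c).foldl f s := by
  induction l generalizing s with
  | nil => rfl
  | cons a l ih => by_cases h : c a <;> simp [h, ih]

theorem pvNodup_eq_singleton (xs : List String) (m : String) (h : xs.Nodup)
    (hm : ∀ x, x ∈ xs ↔ x = m) : xs = [m] := by
  match xs with
  | [] => exact absurd ((hm m).mpr rfl) (by simp)
  | a :: t =>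
    have ha : a = m := (hm a).mp List.mem_cons_self
    subst ha
    match t with
    | [] => rfl
    | b :: t' =>
      have hb : b = a := (hm b).mp (List.mem_cons_of_mem _ List.mem_cons_self)
      exact absurd (by rw [← hb]; exact List.mem_cons_self) (List.nodup_cons.mp h).1

theorem pvSingleton_iff (xs : List String) (m : String) :
    ((xs.length == 1 && (xs.headD "" == m)) = true) ↔ xs = [m] := by
  match xs with
  | [] => simp
  | [a] => simp [List.headD]
  | a :: b :: t => simp

theorem pvSingles_getD (L : List (String × List String)) (m : String) :
    ((pvOwnersFold L PySem.Dict.empty).items.foldl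
        (fun sg q => if q.2.length == 1 then sg.modify (q.2.headD "") [] (fun l => l ++ [q.1]) else sg)
        PySem.Dict.empty).getD m []
      = ((pvOwnersFold L PySem.Dict.empty).items.filter
          (fun q => q.2.length == 1 && (q.2.headD "" == m))).map (·.1) := by
  rw [pvFoldl_if_filter]
  rw [show ((pvOwnersFold L PySem.Dict.empty).items.filter (fun q => q.2.length == 1)).foldl
        (fun sg q => sg.modify (q.2.headD "") [] (fun l => l ++ [q.1])) PySem.Dict.empty
      = (((pvOwnersFold L PySem.Dict.empty).items.filter (fun q => q.2.length == 1)).map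
          (fun q => ((q.2.headD "" : String), q.1))).foldl
        (fun sg p => sg.modify p.1 [] (fun l => l ++ [p.2])) PySem.Dict.empty from by
      rw [List.foldl_map]]
  rw [PySem.Dict.getD_foldl_modify_append]
  simp only [List.filter_map, List.map_map, Function.comp, List.filter_filter,
    PySem.Dict.getD_empty, List.nil_append]
  have h1 : ((pvOwnersFold L PySem.Dict.empty).items.filter
        (fun a => List.headD a.2 "" == m && List.length a.2 == 1))
      = ((pvOwnersFold L PySem.Dict.empty).items.filter
        (fun q => List.length q.2 == 1 && List.headD q.2 "" == m)) :=
    List.filter_congr (fun a _ => by rw [Bool.and_comm])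
  rw [h1]
  exact List.map_congr_left fun a _ => rfl

theorem pvSpecific_eq (L : List (String × List String)) (hknd : (L.map (·.1)).Nodup)
    (p : String × List String) (hp : p ∈ L)
    (q0 : String × List String) (hq0 : q0 ∈ L) (hq0ne : q0.1 ≠ p.1) :
    PySem.List.sorted (PySem.Set.diff (PySem.Set.ofList p.2)
        (pvUnionAll (((L.map (fun r => (r.1, PySem.Set.ofList r.2))).filter
            (fun q => q.1 != p.1)).map (·.2)))) (fun x => x)
      = PySem.List.sorted (((pvOwnersFold L PySem.Dict.empty).items.foldl
          (fun sg q => if q.2.length == 1 then sg.modify (q.2.headD "") [] (fun l => l ++ [q.1]) else sg)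
          PySem.Dict.empty).getD p.1 []) (fun x => x) := by
  rw [pvSingles_getD L p.1,
      pvOwnersItems_filter L hknd (fun s => s.length == 1 && (s.headD "" == p.1))]
  have hcomm : ((L.map (fun r => (r.1, PySem.Set.ofList r.2))).filter (fun q => q.1 != p.1)).map (·.2)
      = (L.filter (fun q => q.1 != p.1)).map (fun r => PySem.Set.ofList r.2) := by
    rw [List.filter_map, List.map_map]
    rfl
  rw [hcomm]
  have hne : (L.filter (fun q => q.1 != p.1)).map (fun r => PySem.Set.ofList r.2) ≠ [] := by
    have : q0 ∈ L.filter (fun q => q.1 != p.1) :=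
      List.mem_filter.mpr ⟨hq0, by simpa using hq0ne⟩
    intro hc
    simp [List.map_eq_nil_iff.mp hc] at this
  apply pvSorted_congr
  · exact PySem.Set.nodup_diff _ _ (PySem.Set.nodup_ofList _)
  · exact (pvNodup_owners_keys _).filter _
  · intro a
    rw [PySem.Set.mem_diff, List.mem_filter, pvMem_owners_keys,
        pvMem_unionAll _ hne, PySem.Set.mem_ofList,
        pvSingleton_iff (pvOwnersOf L a) p.1]
    simp only [List.mem_map, List.mem_filter, bne_iff_ne]
    constructor
    · rintro ⟨hap, hno⟩
      refine ⟨⟨p, hp, hap⟩, ?_⟩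
      apply pvNodup_eq_singleton _ _ (pvOwnersOf_nodup L hknd a)
      intro x
      rw [pvMem_ownersOf]
      constructor
      · rintro ⟨q, hq, haq, rfl⟩
        by_contra hxm
        exact hno ⟨_, ⟨⟨q, ⟨hq, by simpa using hxm⟩, rfl⟩, (PySem.Set.mem_ofList _ _).mpr haq⟩⟩
      · rintro rfl
        exact ⟨p, hp, hap, rfl⟩
    · rintro ⟨⟨q, hq, haq⟩, heq⟩
      have hq1 : q.1 = p.1 := by
        have hmem : q.1 ∈ pvOwnersOf L a := (pvMem_ownersOf L a q.1).mpr ⟨q, hq, haq, rfl⟩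
        rw [heq] at hmem
        simpa using hmem
      have hqp : q = p := pvKey_unique L hknd q hq p hp hq1
      subst hqp
      refine ⟨haq, ?_⟩
      rintro ⟨t, ⟨⟨r, ⟨hr, hrne⟩, rfl⟩, hat⟩⟩
      have hrm : r.1 ∈ pvOwnersOf L a :=
        (pvMem_ownersOf L a r.1).mpr ⟨r, hr, (PySem.Set.mem_ofList _ _).mp hat, rfl⟩
      rw [heq] at hrm
      have : r.1 = q.1 := by simpa using hrm
      simp [this] at hrne

theorem pvExists_other (L : List (String × List String)) (hknd : (L.map (·.1)).Nodup)
    (hlen : L.length ≠ 1) (p : String × List String) (hp : p ∈ L) :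
    ∃ q ∈ L, q.1 ≠ p.1 := by
  match L with
  | [] => cases hp
  | [a] => exact absurd rfl hlen
  | a :: b :: L' =>
    have hab : a.1 ≠ b.1 := by
      have h1 : a.1 ∉ (List.map (fun x => x.1) (b :: L')) := (List.nodup_cons.mp hknd).1
      intro h
      exact h1 (by rw [h]; exact List.mem_map_of_mem List.mem_cons_self)
    by_cases hap : a.1 = p.1
    · exact ⟨b, List.mem_cons_of_mem _ List.mem_cons_self, fun h => hab (hap.trans h.symm)⟩
    · exact ⟨a, List.mem_cons_self, hap⟩

-- ===== VERDICT (by name: the statement is the Claim_ definition above) =====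
theorem compute_shared_vs_specific_spec : Claim_equal_compute_shared_vs_specific := by
  intro t _ hpre
  unfold Spec_compute_shared_vs_specific compute_shared_vs_specific compute_shared_vs_specific_alt
  have hknd : (((PySem.Dict.ofList t).items).map (fun p => p.1)).Nodup := by
    have := PySem.Dict.nodup_keys_ofList t
    simpa [PySem.Dict.keys] using this
  have hkeys : (PySem.Dict.ofList t).keys = PySem.Set.ofList (t.map (fun p => p.1)) := by
    have := PySem.Dict.keys_foldl_insert_key t (fun p => p.1) (fun _ p => p.2) PySem.Dict.empty
    simpa [PySem.Dict.ofList, PySem.Dict.update, PySem.Set.update_nil_left] using this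
  have hlen : (PySem.Dict.ofList t).items.length ≠ 1 := by
    unfold Pre_compute_shared_vs_specific at hpre
    have h2 : (PySem.Dict.ofList t).items.length
        = (PySem.Set.ofList (t.map (fun p => p.1))).length := by
      rw [← hkeys]
      simp [PySem.Dict.keys]
    rw [h2]
    exact hpre
  simp only [PySem.Dict.size, PySem.Dict.values]
  rw [pvSets_items t]
  by_cases hnil : (PySem.Dict.ofList t).items = []
  · rw [hnil]; rfl
  · have hspecnd : ((((PySem.Dict.ofList t).items.map
        (fun p => (p.1, PySem.Set.ofList p.2))).map (fun p => p.1))).Nodup := by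
      simpa [List.map_map, Function.comp] using hknd
    rw [PySem.Dict.items_foldl_insert_fresh
        ((PySem.Dict.ofList t).items.map (fun p => (p.1, PySem.Set.ofList p.2)))
        (fun p => p.1)
        (fun p => PySem.List.sorted
          (PySem.Set.diff p.2 (pvUnionAll
            ((((PySem.Dict.ofList t).items.map (fun p => (p.1, PySem.Set.ofList p.2))).filter
                (fun q => q.1 != p.1)).map (·.2)))) (fun x => x))
        PySem.Dict.empty (fun a _ => PySem.Dict.contains_empty _) hspecnd]
    simp only [List.isEmpty_iff, hnil, List.map_eq_nil_iff, List.map_map,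
      PySem.Dict.empty, List.nil_append]
    refine Prod.ext ?_ ?_
    · exact pvShared_eq _ hknd hnil
    · refine List.map_congr_left fun p hp => ?_
      obtain ⟨q0, hq0, hq0ne⟩ := pvExists_other _ hknd hlen p hp
      exact Prod.ext rfl (pvSpecific_eq _ hknd p hp q0 hq0 hq0ne)
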